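-- pv_equiv track=rewrite | github.com/sz3/cimbar | cimbar/util/skip_iterator.py | skip_iterator
-- ===== SOURCE A (Python) =====
-- def skip_iterator(l, step):
--     '''
--     step should be prime. We use 31 in `decode_color`
--     '''
--     l = list(l)
--     i = 0
--     count = 0
--     while count < len(l):
--         i += step
--         i %= len(l)
--         yield l[i]
--         count += 1
-- ===== SOURCE B (Python) =====
-- def skip_iterator(l, step):
--     # Number-theoretic: the index sequence (k*step) % n is periodic with
--     # period p = n // gcd(n, step % n); emit one period, then repeat it.
--     l = list(l)
--     n = len(l)
--     if n == 0:
--         return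
--     d = step % n
--     g, b = n, d
--     while b:
--         g, b = b, g % b
--     p = n // g
--     cycle = [l[k * d % n] for k in range(1, p + 1)]
--     for _ in range(g):
--         yield from cycle
-- ===== Notes on version B (the rewrite author's own statement) =====
-- stated objective: alternative
-- what changed: Instead of stepping a running index across all n elements, B computes g = gcd(n, step mod n) by Euclid's algorithm, materialises the single orbit of length n//g once, and emits it g times.
import Mathlib
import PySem

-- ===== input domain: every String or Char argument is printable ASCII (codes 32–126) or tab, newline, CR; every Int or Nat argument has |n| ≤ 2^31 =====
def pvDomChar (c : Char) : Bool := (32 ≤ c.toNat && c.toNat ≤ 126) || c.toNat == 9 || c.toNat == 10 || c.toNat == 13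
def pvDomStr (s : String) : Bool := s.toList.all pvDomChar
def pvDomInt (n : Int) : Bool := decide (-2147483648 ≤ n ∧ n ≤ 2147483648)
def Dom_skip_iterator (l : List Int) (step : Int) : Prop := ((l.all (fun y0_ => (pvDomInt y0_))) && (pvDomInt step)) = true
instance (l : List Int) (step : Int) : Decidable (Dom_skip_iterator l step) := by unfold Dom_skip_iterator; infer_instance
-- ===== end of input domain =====

-- B replaces A's element-by-element running-index walk with a number-theoretic
-- construction: g = gcd(n, step mod n) by Euclid, one orbit of length n//g, emitted g times.


-- ===== PORT A =====
-- A's while loop: `remaining` counts the iterations still to do (count < len(l)),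
-- `i` is the running index; each step does i += step; i %= len(l); yield l[i].
def skipALoop (l : List Int) (step : Int) : Nat → Int → List Int
  | 0, _ => []
  | Nat.succ remaining, i =>
    let i' := PySem.Int.mod (i + step) (l.length : Int)
    PySem.List.pyGetD l i' 0 :: skipALoop l step remaining i'

def skip_iterator (l : List Int) (step : Int) : List Int :=
  skipALoop l step l.length 0

-- ===== PORT B =====
-- termination fact for Euclid's loop: |g % b| < |b| when b ≠ 0 (Python mod)
theorem pySemMod_natAbs_lt (g b : Int) (hb : b ≠ 0) :
    (PySem.Int.mod g b).natAbs < b.natAbs := by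
  rcases lt_or_gt_of_ne hb with h | h
  · have := PySem.Int.mod_neg_bounds g h
    omega
  · have h1 := PySem.Int.mod_nonneg g h
    have h2 := PySem.Int.mod_lt g h
    omega

-- `while b: g, b = b, g % b`
def euclidLoop (g b : Int) : Int :=
  if hb : b ≠ 0 then euclidLoop b (PySem.Int.mod g b) else g
termination_by b.natAbs
decreasing_by exact pySemMod_natAbs_lt g b hb

-- B: one orbit of length p = n // gcd(n, step % n), repeated gcd times.
def skip_iterator_alt (l : List Int) (step : Int) : List Int :=
  let n : Int := (l.length : Int)
  if n = 0 then [] else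
  let d := PySem.Int.mod step n
  let g := euclidLoop n d
  let p := PySem.Int.floordiv n g
  let cycle := (PySem.List.pyRange 1 (p + 1) 1).map
    (fun k => PySem.List.pyGetD l (PySem.Int.mod (k * d) n) 0)
  (PySem.List.pyRange 0 g 1).foldl (fun acc _ => acc ++ cycle) []

-- ===== PRECONDITION & SPEC =====
def Spec_skip_iterator (l : List Int) (step : Int) (out : List Int) : Prop := out = skip_iterator_alt l step
instance (l : List Int) (step : Int) (out : List Int) : Decidable (Spec_skip_iterator l step out) := by unfold Spec_skip_iterator; infer_instance

-- ===== CLAIM (what is proved, stated in full; the proofs are below) =====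
def Claim_equal_skip_iterator : Prop := ∀ (l : List Int) (step : Int), Dom_skip_iterator l step → Spec_skip_iterator l step (skip_iterator l step)

-- ===== LEMMAS AND PROOFS =====

-- Loop invariant for A: after k iterations the running index i satisfies
-- i ≡ k*step (mod n), so the remaining c iterations yield the directly-indexed
-- elements for counters k+1 … k+c.
theorem skipALoop_eq (l : List Int) (step : Int) (hl : 0 < l.length) :
    ∀ (c k : Nat) (i : Int), i % (l.length : Int) = ((k : Int) * step) % (l.length : Int) →
    skipALoop l step c i =
      (PySem.List.pyRange ((k : Int) + 1) ((k : Int) + (c : Int) + 1) 1).map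
        (fun j => PySem.List.pyGetD l (PySem.Int.mod (j * step) (l.length : Int)) 0) := by
  intro c
  induction c with
  | zero =>
    intro k i _
    rw [PySem.List.pyRange_one_eq_nil (by push_cast; omega)]
    simp [skipALoop]
  | succ c ih =>
    intro k i hi
    have hn : (0 : Int) < (l.length : Int) := by exact_mod_cast hl
    have hmod : PySem.Int.mod (i + step) (l.length : Int)
        = PySem.Int.mod (((k : Int) + 1) * step) (l.length : Int) := by
      rw [PySem.Int.mod_eq_emod_of_pos hn, PySem.Int.mod_eq_emod_of_pos hn]
      calc (i + step) % (l.length : Int)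
          = (i % (l.length : Int) + step) % (l.length : Int) := (Int.emod_add_emod _ _ _).symm
        _ = (((k : Int) * step) % (l.length : Int) + step) % (l.length : Int) := by rw [hi]
        _ = ((k : Int) * step + step) % (l.length : Int) := Int.emod_add_emod _ _ _
        _ = (((k : Int) + 1) * step) % (l.length : Int) := by ring_nf
    rw [PySem.List.pyRange_one_cons (by push_cast; omega), List.map_cons]
    simp only [skipALoop]
    rw [hmod]
    have hih := ih (k + 1) (PySem.Int.mod (((k : Int) + 1) * step) (l.length : Int))
      (by rw [PySem.Int.mod_eq_emod_of_pos hn]; exact Int.emod_emod_of_dvd _ dvd_rfl)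
    push_cast at hih
    rw [hih]
    congr 3
    push_cast
    ring

-- Euclid invariants: the result is positive and divides both arguments.
theorem euclidLoop_props : ∀ (m : Nat) (a b : Int), b.natAbs ≤ m → 0 < a → 0 ≤ b →
    0 < euclidLoop a b ∧ euclidLoop a b ∣ a ∧ euclidLoop a b ∣ b := by
  intro m
  induction m with
  | zero =>
    intro a b hm ha hb
    have hb0 : b = 0 := by omega
    rw [euclidLoop, dif_neg (by simp [hb0])]
    simp [hb0, ha]
  | succ m ih =>
    intro a b hm ha hb
    rw [euclidLoop]
    by_cases hb0 : b ≠ 0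
    · rw [dif_pos hb0]
      have hbpos : 0 < b := lt_of_le_of_ne hb (Ne.symm hb0)
      have h1 := PySem.Int.mod_nonneg a hbpos
      have h2 := PySem.Int.mod_lt a hbpos
      have hlt := pySemMod_natAbs_lt a b hb0
      obtain ⟨hg, hdb, hdm⟩ := ih b (PySem.Int.mod a b) (by omega) hbpos h1
      refine ⟨hg, ?_, hdb⟩
      have := PySem.Int.floordiv_mul_add_mod a b
      calc euclidLoop b (PySem.Int.mod a b) ∣ PySem.Int.floordiv a b * b + PySem.Int.mod a b :=
            Dvd.dvd.add (Dvd.dvd.mul_left hdb _) hdm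
        _ = a := this
    · rw [dif_neg hb0]
      simp only [not_not] at hb0
      simp [hb0, ha]

-- foldl of constant appends is a flattened replicate.
theorem foldl_append_replicate {α β : Type} (cycle : List α) :
    ∀ (xs : List β) (acc : List α),
      xs.foldl (fun a _ => a ++ cycle) acc = acc ++ (List.replicate xs.length cycle).flatten := by
  intro xs
  induction xs with
  | nil => intro acc; simp
  | cons x xs ih => intro acc; simp [ih, List.replicate_succ, List.append_assoc]

-- Periodicity: the counter-indexed element map over one block of length p
-- is the same as over the first block, when n divides (shift)·d.
theorem map_block_shift (l : List Int) (d c p : Int) (hn : 0 < (l.length : Int))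
    (hdvd : (l.length : Int) ∣ c * d) (hp : 0 ≤ p) :
    (PySem.List.pyRange (c + 1) (c + p + 1) 1).map
        (fun k => PySem.List.pyGetD l (PySem.Int.mod (k * d) (l.length : Int)) 0)
      = (PySem.List.pyRange 1 (p + 1) 1).map
        (fun k => PySem.List.pyGetD l (PySem.Int.mod (k * d) (l.length : Int)) 0) := by
  rw [PySem.List.pyRange_one, PySem.List.pyRange_one]
  have : (c + p + 1 - (c + 1)).toNat = (p + 1 - 1).toNat := by omega
  rw [this, List.map_map, List.map_map]
  apply List.map_congr_left
  intro k _
  simp only [Function.comp]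
  congr 1
  obtain ⟨e, he⟩ := hdvd
  rw [PySem.Int.mod_eq_emod_of_pos hn, PySem.Int.mod_eq_emod_of_pos hn]
  have : (c + 1 + (k : Int)) * d = (1 + (k : Int)) * d + (l.length : Int) * e := by
    rw [← he]; ring
  rw [this, Int.add_mul_emod_self_left]

-- The full counter range 1..m*p splits into m identical blocks.
theorem map_range_blocks (l : List Int) (d p : Int) (hn : 0 < (l.length : Int))
    (hp : 0 ≤ p) (hdvd : (l.length : Int) ∣ p * d) :
    ∀ (m : Nat),
    (PySem.List.pyRange 1 ((m : Int) * p + 1) 1).map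
        (fun k => PySem.List.pyGetD l (PySem.Int.mod (k * d) (l.length : Int)) 0)
      = (List.replicate m ((PySem.List.pyRange 1 (p + 1) 1).map
          (fun k => PySem.List.pyGetD l (PySem.Int.mod (k * d) (l.length : Int)) 0))).flatten := by
  intro m
  induction m with
  | zero => rw [PySem.List.pyRange_one_eq_nil (by omega)]; simp
  | succ m ih =>
    have hsplit : PySem.List.pyRange 1 (((m : Nat) + 1 : Nat) * p + 1) 1
        = PySem.List.pyRange 1 ((m : Int) * p + 1) 1
          ++ PySem.List.pyRange ((m : Int) * p + 1) ((m : Int) * p + p + 1) 1 := by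
      have hmp : 0 ≤ (m : Int) * p := by positivity
      have h1 : (1 : Int) ≤ (m : Int) * p + 1 := by omega
      have h2 : (m : Int) * p + 1 ≤ (m : Int) * p + p + 1 := by omega
      have : (((m : Nat) + 1 : Nat) : Int) * p + 1 = (m : Int) * p + p + 1 := by push_cast; ring
      rw [this]
      exact PySem.List.pyRange_one_append 1 ((m : Int) * p + 1) ((m : Int) * p + p + 1) h1 h2
    rw [hsplit, List.map_append, ih,
        map_block_shift l d ((m : Int) * p) p hn
          (by obtain ⟨e, he⟩ := hdvd; exact ⟨(m : Int) * e, by rw [mul_assoc, he]; ring⟩) hp,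
        List.replicate_succ', List.flatten_append]
    simp

theorem skip_iterator_eq (l : List Int) (step : Int) :
    skip_iterator l step = skip_iterator_alt l step := by
  rcases Nat.eq_zero_or_pos l.length with h0 | hpos
  · unfold skip_iterator skip_iterator_alt
    rw [h0]
    simp [skipALoop]
  · have hn : (0 : Int) < (l.length : Int) := by exact_mod_cast hpos
    have hA := skipALoop_eq l step hpos l.length 0 0 (by simp)
    have hne : ¬ ((l.length : Int) = 0) := by omega
    unfold skip_iterator
    simp only [skip_iterator_alt]
    rw [if_neg hne]
    have hd0 := PySem.Int.mod_nonneg step hn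
    have hdlt := PySem.Int.mod_lt step hn
    set d := PySem.Int.mod step (l.length : Int) with hd
    obtain ⟨hg, hgn, hgd⟩ := euclidLoop_props d.natAbs (l.length : Int) d le_rfl hn hd0
    set g := euclidLoop (l.length : Int) d with hgdef
    have hpfloor : PySem.Int.floordiv (l.length : Int) g = (l.length : Int) / g :=
      PySem.Int.floordiv_eq_ediv_of_pos hg
    set p := PySem.Int.floordiv (l.length : Int) g with hpdef
    have hpg : p * g = (l.length : Int) := by rw [hpfloor]; exact Int.ediv_mul_cancel hgn
    have hp0 : 0 ≤ p := by rw [hpfloor]; exact Int.ediv_nonneg (by omega) (by omega)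
    have hnpd : (l.length : Int) ∣ p * d := by
      obtain ⟨e, he⟩ := hgd
      exact ⟨e, by rw [he, ← mul_assoc, hpg]⟩
    -- RHS: foldl over range(g) of appends = g copies of the cycle
    rw [foldl_append_replicate]
    rw [show (PySem.List.pyRange 0 g 1).length = g.toNat from by
      rw [PySem.List.length_pyRange_one]; omega]
    -- LHS: A's loop = counter-indexed map over 1..n, with step replaced by d
    push_cast at hA
    rw [hA, List.nil_append]
    have hstep_d : ∀ k : Int, PySem.Int.mod (k * step) (l.length : Int)
        = PySem.Int.mod (k * d) (l.length : Int) := by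
      intro k
      rw [PySem.Int.mod_eq_emod_of_pos hn, PySem.Int.mod_eq_emod_of_pos hn, hd,
          PySem.Int.mod_eq_emod_of_pos hn, Int.mul_emod k step, Int.mul_emod k (step % _),
          Int.emod_emod_of_dvd step dvd_rfl]
    have hmap : (PySem.List.pyRange 1 (0 + (l.length : Int) + 1) 1).map
          (fun j => PySem.List.pyGetD l (PySem.Int.mod (j * step) (l.length : Int)) 0)
        = (PySem.List.pyRange 1 ((g.toNat : Int) * p + 1) 1).map
          (fun j => PySem.List.pyGetD l (PySem.Int.mod (j * d) (l.length : Int)) 0) := by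
      have h : (g.toNat : Int) * p + 1 = 0 + (l.length : Int) + 1 := by
        have hc : (g.toNat : Int) = g := by omega
        rw [hc, mul_comm, hpg]; ring
      rw [h]
      exact List.map_congr_left (fun k _ => by rw [hstep_d k])
    rw [hmap, map_range_blocks l d p hn hp0 hnpd g.toNat]

-- ===== VERDICT (by name: the statement is the Claim_ definition above) =====
theorem skip_iterator_spec : Claim_equal_skip_iterator := by
  intro l step _
  unfold Spec_skip_iterator
  exact skip_iterator_eq l step
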